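-- pv_equiv track=rewrite | github.com/marinov98/Machine_Learning | Assignment2.Marinov.Marin/standard2.py | analyzef1
-- ===== SOURCE A (Python) =====
-- def analyzef1(data):
--     highs = 0
--     mediums = 0
--     lows = 0
--     vlows = 0
--
--     for item in data:
--         for key, value in item.items():
--             if (key == 'f1'):
--                 if (value == "high"):
--                     highs += 1
--                 elif (value == "medium"):
--                     mediums += 1
--                 elif (value == "low"):
--                     lows += 1
--                 elif (value == "vlow"):
--                     vlows += 1
--
--     return {"highCount": highs, "mediumsCount": mediums, "lowsCount": lows, "vlowCount": vlows}
-- ===== SOURCE B (Python) =====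
-- def analyzef1(data):
--     tally = {}
--     for item in data:
--         v = item.get('f1')
--         if v is not None:
--             tally[v] = tally.get(v, 0) + 1
--     return {"highCount": tally.get("high", 0),
--             "mediumsCount": tally.get("medium", 0),
--             "lowsCount": tally.get("low", 0),
--             "vlowCount": tally.get("vlow", 0)}
-- ===== Notes on version B (the rewrite author's own statement) =====
-- stated objective: idiomatic
-- what changed: Replaces the inner key-scan and the four branch-updated scalar counters by a single dict.get('f1') lookup per item feeding a value-keyed tally dict, from which the four categories are read off with tally.get(cat, 0).
import Mathlib
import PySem

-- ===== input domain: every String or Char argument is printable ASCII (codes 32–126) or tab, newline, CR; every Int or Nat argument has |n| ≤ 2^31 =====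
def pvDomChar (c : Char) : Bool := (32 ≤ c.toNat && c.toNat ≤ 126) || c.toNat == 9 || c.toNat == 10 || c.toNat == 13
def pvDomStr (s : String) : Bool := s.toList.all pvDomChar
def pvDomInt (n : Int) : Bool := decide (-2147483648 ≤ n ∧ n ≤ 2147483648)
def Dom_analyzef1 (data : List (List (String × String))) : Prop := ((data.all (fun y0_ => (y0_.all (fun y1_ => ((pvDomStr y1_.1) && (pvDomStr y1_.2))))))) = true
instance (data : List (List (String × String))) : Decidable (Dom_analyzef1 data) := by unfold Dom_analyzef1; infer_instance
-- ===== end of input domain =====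

-- B replaces the inner key-scan feeding four branch-updated scalar counters by one
-- dict.get('f1') per item feeding a value-keyed tally dict read off with .get(cat, 0)
-- (idiomatic; same cost).

-- ===== PORT A =====
def analyzef1 (data : List (List (String × String))) : List (String × Int) :=
  -- highs = mediums = lows = vlows = 0; for item in data: for key, value in item.items(): …
  let s : Int × Int × Int × Int :=
    data.foldl (fun s item =>
      item.foldl (fun s kv =>
        if kv.1 == "f1" then
          if kv.2 == "high" then (s.1 + 1, s.2.1, s.2.2.1, s.2.2.2)
          else if kv.2 == "medium" then (s.1, s.2.1 + 1, s.2.2.1, s.2.2.2)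
          else if kv.2 == "low" then (s.1, s.2.1, s.2.2.1 + 1, s.2.2.2)
          else if kv.2 == "vlow" then (s.1, s.2.1, s.2.2.1, s.2.2.2 + 1)
          else s
        else s) s) (0, 0, 0, 0)
  [("highCount", s.1), ("mediumsCount", s.2.1), ("lowsCount", s.2.2.1), ("vlowCount", s.2.2.2)]

-- ===== PORT B =====
def analyzef1_alt (data : List (List (String × String))) : List (String × Int) :=
  -- tally = {}; for item in data: v = item.get('f1'); if v is not None: tally[v] = tally.get(v,0)+1
  let tally : PySem.Dict String Int :=
    data.foldl (fun t item =>
      match (PySem.Dict.mk item).get? "f1" with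
      | some v => t.insert v (t.getD v 0 + 1)
      | none => t) PySem.Dict.empty
  [("highCount", tally.getD "high" 0), ("mediumsCount", tally.getD "medium" 0),
   ("lowsCount", tally.getD "low" 0), ("vlowCount", tally.getD "vlow" 0)]

-- ===== PRECONDITION & SPEC =====
-- Pre_ excludes association lists with a duplicated key inside an item: a Python dict cannot
-- have duplicate keys, so such encodings correspond to no input of the Python programs.
def Pre_analyzef1 (data : List (List (String × String))) : Prop :=
  ∀ item ∈ data, (item.map Prod.fst).Nodup
instance (data : List (List (String × String))) : Decidable (Pre_analyzef1 data) := by unfold Pre_analyzef1; infer_instance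
def pvWitness_analyzef1 : (List (List (String × String))) :=
  [[("f1", "high"), ("k", "v")], [("f1", "low")], [("a", "b")]]
def Spec_analyzef1 (data : List (List (String × String))) (out : List (String × Int)) : Prop := out = analyzef1_alt data
instance (data : List (List (String × String))) (out : List (String × Int)) : Decidable (Spec_analyzef1 data out) := by unfold Spec_analyzef1; infer_instance

-- ===== CLAIM (what is proved, stated in full; the proofs are below) =====
def Claim_equal_analyzef1 : Prop := ∀ (data : List (List (String × String))), Dom_analyzef1 data → Pre_analyzef1 data → Spec_analyzef1 data (analyzef1 data)

-- ===== LEMMAS AND PROOFS =====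

-- count of the pair ("f1", v) inside one item
def pvCnt (item : List (String × String)) (v : String) : Int :=
  (item.count ("f1", v) : Int)

-- the 'f1' value of each item, B's intermediate list
def pvVals (data : List (List (String × String))) : List String :=
  data.filterMap (fun item => (PySem.Dict.mk item).get? "f1")

-- A's inner loop adds the per-item pair counts to the four accumulators
theorem pvA_inner (item : List (String × String)) (s : Int × Int × Int × Int) :
    item.foldl (fun s kv =>
        if kv.1 == "f1" then
          if kv.2 == "high" then (s.1 + 1, s.2.1, s.2.2.1, s.2.2.2)
          else if kv.2 == "medium" then (s.1, s.2.1 + 1, s.2.2.1, s.2.2.2)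
          else if kv.2 == "low" then (s.1, s.2.1, s.2.2.1 + 1, s.2.2.2)
          else if kv.2 == "vlow" then (s.1, s.2.1, s.2.2.1, s.2.2.2 + 1)
          else s
        else s) s
    = (s.1 + pvCnt item "high", s.2.1 + pvCnt item "medium",
       s.2.2.1 + pvCnt item "low", s.2.2.2 + pvCnt item "vlow") := by
  induction item generalizing s with
  | nil => simp [pvCnt]
  | cons kv rest ih =>
    obtain ⟨k, v⟩ := kv
    rw [List.foldl_cons, ih]
    by_cases hk : k = "f1"
    · subst hk
      by_cases h1 : v = "high"
      · subst h1; simp [pvCnt]; omega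
      · by_cases h2 : v = "medium"
        · subst h2; simp [pvCnt]; omega
        · by_cases h3 : v = "low"
          · subst h3; simp [pvCnt, h1, h2]; omega
          · by_cases h4 : v = "vlow"
            · subst h4; simp [pvCnt, h1, h2, h3]; omega
            · simp [pvCnt, h1, h2, h3, h4]
    · simp [pvCnt, hk]

-- with unique keys, the pair count is decided by the first-match lookup
theorem pvCnt_get? (item : List (String × String)) (h : (item.map Prod.fst).Nodup) (v : String) :
    pvCnt item v = if (PySem.Dict.mk item).get? "f1" = some v then 1 else 0 := by
  induction item with
  | nil => simp [pvCnt, PySem.Dict.get?]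
  | cons kv rest ih =>
    obtain ⟨k, w⟩ := kv
    simp only [List.map_cons, List.nodup_cons] at h
    rw [PySem.Dict.get?_mk_cons]
    by_cases hk : k = "f1"
    · subst hk
      have hz : rest.count ("f1", v) = 0 := by
        rw [List.count_eq_zero]
        intro hm
        exact h.1 (List.mem_map.mpr ⟨_, hm, rfl⟩)
      by_cases hv : w = v
      · subst hv; simp [pvCnt, hz]
      · simp [pvCnt, hz, hv]
    · have hc : pvCnt ((k, w) :: rest) v = pvCnt rest v := by
        simp [pvCnt, hk]
      rw [hc, ih h.2]
      simp [hk]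

-- A's outer loop adds, per category, the number of items whose 'f1' value is that category
theorem pvA_fold (data : List (List (String × String)))
    (hpre : ∀ item ∈ data, (item.map Prod.fst).Nodup) (s : Int × Int × Int × Int) :
    data.foldl (fun s item =>
      item.foldl (fun s kv =>
        if kv.1 == "f1" then
          if kv.2 == "high" then (s.1 + 1, s.2.1, s.2.2.1, s.2.2.2)
          else if kv.2 == "medium" then (s.1, s.2.1 + 1, s.2.2.1, s.2.2.2)
          else if kv.2 == "low" then (s.1, s.2.1, s.2.2.1 + 1, s.2.2.2)
          else if kv.2 == "vlow" then (s.1, s.2.1, s.2.2.1, s.2.2.2 + 1)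
          else s
        else s) s) s
    = (s.1 + ((pvVals data).count "high" : Int), s.2.1 + ((pvVals data).count "medium" : Int),
       s.2.2.1 + ((pvVals data).count "low" : Int), s.2.2.2 + ((pvVals data).count "vlow" : Int)) := by
  induction data generalizing s with
  | nil => simp [pvVals]
  | cons item rest ih =>
    rw [List.foldl_cons, pvA_inner, ih (fun i hi => hpre i (List.mem_cons_of_mem _ hi))]
    have hnd := hpre item (List.mem_cons_self)
    have hcount : ∀ v : String,
        ((pvVals (item :: rest)).count v : Int) = pvCnt item v + ((pvVals rest).count v : Int) := by
      intro v
      rw [pvCnt_get? item hnd v]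
      unfold pvVals
      rw [List.filterMap_cons]
      cases hg : (PySem.Dict.mk item).get? "f1" with
      | none => simp
      | some w =>
        by_cases hv : w = v
        · subst hv; simp; omega
        · simp [hv]
    simp only [hcount]
    simp [Prod.ext_iff]; omega

-- B's option-matching loop is the counting loop over the list of 'f1' values
theorem pvB_fold (data : List (List (String × String))) (t : PySem.Dict String Int) :
    data.foldl (fun t item =>
      match (PySem.Dict.mk item).get? "f1" with
      | some v => t.insert v (t.getD v 0 + 1)
      | none => t) t
    = (pvVals data).foldl (fun t v => t.insert v (t.getD v 0 + 1)) t := by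
  induction data generalizing t with
  | nil => simp [pvVals]
  | cons item rest ih =>
    unfold pvVals
    rw [List.foldl_cons, List.filterMap_cons]
    cases hg : (PySem.Dict.mk item).get? "f1" with
    | none => simp [ih, pvVals]
    | some w => simp [ih, pvVals]

-- ===== VERDICT (by name: the statement is the Claim_ definition above) =====
theorem analyzef1_spec : Claim_equal_analyzef1 := by
  intro data _ hpre
  unfold Spec_analyzef1 analyzef1 analyzef1_alt
  rw [pvA_fold data hpre, pvB_fold]
  simp [PySem.Dict.getD_foldl_insert_add_one]
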